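-- pv_equiv track=rewrite | github.com/DmitryBozhko/CPU-Design-and-Simulation-Project | src/numeric_core/twos_complement.py | _normalize_slice
-- ===== SOURCE A (Python) =====
-- def _normalize_slice(bits: list[int], width: int) -> list[int]:
--     normalized: list[int] = []
--     it = iter(bits)
--     for _ in range(width):
--         try:
--             value = next(it)
--         except StopIteration:
--             value = 0
--         normalized.append(value & 1)
--     return normalized
-- ===== SOURCE B (Python) =====
-- def _normalize_slice(bits: list[int], width: int) -> list[int]:
--     w = max(width, 0)
--     masked = [b & 1 for b in bits[:w]]
--     return masked + [0] * (w - len(masked))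
-- ===== Notes on version B (the rewrite author's own statement) =====
-- stated objective: simpler
-- what changed: Replaced the per-element iterator/StopIteration loop with a two-phase slice-and-pad: mask the first min(width, len(bits)) bits in one comprehension, then append the remaining zeros in one multiplication.
import Mathlib
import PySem

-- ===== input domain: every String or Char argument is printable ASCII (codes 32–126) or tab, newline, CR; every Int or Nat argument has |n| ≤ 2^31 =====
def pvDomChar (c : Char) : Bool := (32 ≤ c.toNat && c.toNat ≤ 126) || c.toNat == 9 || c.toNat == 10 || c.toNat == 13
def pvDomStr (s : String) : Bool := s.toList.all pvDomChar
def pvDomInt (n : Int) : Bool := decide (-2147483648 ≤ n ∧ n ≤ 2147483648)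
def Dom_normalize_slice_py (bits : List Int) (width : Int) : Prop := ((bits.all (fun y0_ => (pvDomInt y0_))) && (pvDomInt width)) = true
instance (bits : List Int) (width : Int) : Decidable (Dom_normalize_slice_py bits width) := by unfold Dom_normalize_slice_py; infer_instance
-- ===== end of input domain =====

-- B replaces A's per-element iterator loop with a two-phase slice-and-pad (mask the prefix, append zeros); objective: simpler.

-- ===== PORT A =====
-- state = (normalized, iterator position); next(it) returns bits[i] if available, the except-branch yields 0
def normalize_slice_py (bits : List Int) (width : Int) : List Int :=
  ((PySem.List.pyRange 0 width 1).foldl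
    (fun (st : List Int × Nat) _ =>
      let value := bits.getD st.2 0
      (st.1 ++ [PySem.Int.band value 1], st.2 + 1))
    ([], 0)).1

-- ===== PORT B =====
def normalize_slice_py_alt (bits : List Int) (width : Int) : List Int :=
  let w := max width 0
  let masked := (PySem.List.slice bits none (some w)).map (fun b => PySem.Int.band b 1)
  masked ++ List.replicate (w - (masked.length : Int)).toNat 0

-- ===== PRECONDITION & SPEC =====
def Spec_normalize_slice_py (bits : List Int) (width : Int) (out : List Int) : Prop := out = normalize_slice_py_alt bits width
instance (bits : List Int) (width : Int) (out : List Int) : Decidable (Spec_normalize_slice_py bits width out) := by unfold Spec_normalize_slice_py; infer_instance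

-- ===== CLAIM (what is proved, stated in full; the proofs are below) =====
def Claim_equal_normalize_slice_py : Prop := ∀ (bits : List Int) (width : Int), Dom_normalize_slice_py bits width → Spec_normalize_slice_py bits width (normalize_slice_py bits width)

-- ===== LEMMAS AND PROOFS =====

-- n-step iteration of A's loop body (the body ignores the range element)
def pvIterA (bits : List Int) : Nat → (List Int × Nat) → (List Int × Nat)
  | 0, st => st
  | n + 1, st => pvIterA bits n (st.1 ++ [PySem.Int.band (bits.getD st.2 0) 1], st.2 + 1)

lemma foldl_const_eq_iterA (bits : List Int) (l : List Int) (st : List Int × Nat) :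
    l.foldl (fun (st : List Int × Nat) _ =>
      (st.1 ++ [PySem.Int.band (bits.getD st.2 0) 1], st.2 + 1)) st
      = pvIterA bits l.length st := by
  induction l generalizing st with
  | nil => rfl
  | cons x xs ih =>
    simp only [List.foldl_cons, List.length_cons, pvIterA]
    exact ih _

lemma iterA_spec (bits : List Int) : ∀ (n i : Nat) (acc : List Int),
    (pvIterA bits n (acc, i)).1
      = acc ++ ((bits.drop i).take n).map (fun b => PySem.Int.band b 1)
            ++ List.replicate (n - (bits.length - i)) 0 := by
  intro n
  induction n with
  | zero => intro i acc; simp [pvIterA]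
  | succ n ih =>
    intro i acc
    by_cases h : i < bits.length
    · have hd : bits.drop i = bits[i] :: bits.drop (i + 1) :=
        (List.drop_eq_getElem_cons h)
      have hg : bits.getD i 0 = bits[i] := by
        simp [List.getD, List.getElem?_eq_getElem h]
      have hstep : pvIterA bits (n+1) (acc, i)
          = pvIterA bits n (acc ++ [PySem.Int.band (bits.getD i 0) 1], i + 1) := rfl
      rw [hstep, hg, ih]
      have hc : n + 1 - (bits.length - i) = n - (bits.length - (i + 1)) := by omega
      rw [hd, hc, List.take_succ_cons, List.map_cons]
      simp
    · have he : bits.drop i = [] := by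
        simp [List.drop_eq_nil_iff]; omega
      have hg : bits.getD i 0 = 0 := by
        simp [List.getD, List.getElem?_eq_none (by omega : bits.length ≤ i)]
      have hb : PySem.Int.band 0 1 = 0 := by decide
      have hstep : pvIterA bits (n+1) (acc, i)
          = pvIterA bits n (acc ++ [PySem.Int.band (bits.getD i 0) 1], i + 1) := rfl
      rw [hstep, hg, hb, ih]
      have he' : bits.drop (i + 1) = [] := by
        simp [List.drop_eq_nil_iff]; omega
      have hc : n + 1 - (bits.length - i) = n - (bits.length - (i+1)) + 1 := by omega
      rw [he, he', hc]
      simp [List.replicate_succ]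

-- B's port, with the slice and the padding count written out
lemma alt_eq (bits : List Int) (width : Int) :
    normalize_slice_py_alt bits width
      = (bits.take (max width 0).toNat).map (fun b => PySem.Int.band b 1)
        ++ List.replicate ((max width 0).toNat - bits.length) 0 := by
  show (PySem.List.slice bits none (some (max width 0))).map (fun b => PySem.Int.band b 1)
      ++ List.replicate ((max width 0)
          - (((PySem.List.slice bits none (some (max width 0))).map
              (fun b => PySem.Int.band b 1)).length : Int)).toNat 0 = _
  rw [PySem.List.slice_to bits (le_max_right _ _)]
  congr 2
  simp [List.length_take]
  omega

-- ===== VERDICT (by name: the statement is the Claim_ definition above) =====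
theorem normalize_slice_py_spec : Claim_equal_normalize_slice_py := by
  intro bits width _
  unfold Spec_normalize_slice_py normalize_slice_py
  rw [foldl_const_eq_iterA, PySem.List.length_pyRange_one, iterA_spec, alt_eq]
  have h1 : width.toNat = (max width 0).toNat := by omega
  simp [h1]
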